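-- pv_equiv track=rewrite | github.com/PaddlePaddle/PaddleNLP | examples/text_to_sql/IGSQL/data_util/tokenizers.py | lambda_tokenize
-- ===== SOURCE A (Python) =====
-- def lambda_tokenize(string):
--     """ Tokenizes a lambda-calculus statement into tokens.
--
--     Args:
--        string(`str`): a lambda-calculus string
--
--     Outputs:
--        `list`: a list of tokens.
--     """
--
--     space_separated = string.split(" ")
--
--     new_tokens = []
--
--     # Separate the string by spaces, then separate based on existence of ( or
--     # ).
--     for token in space_separated:
--         tokens = []
--
--         current_token = ""
--         for char in token:
--             if char == ")" or char == "(":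
--                 tokens.append(current_token)
--                 tokens.append(char)
--                 current_token = ""
--             else:
--                 current_token += char
--         tokens.append(current_token)
--         new_tokens.extend([tok for tok in tokens if tok])
--
--     return new_tokens
-- ===== SOURCE B (Python) =====
-- def lambda_tokenize(string):
--     """Single linear pass: flush the buffer on ' ', '(' or ')'; parens are their own tokens."""
--     tokens = []
--     buf = []
--     for ch in string:
--         if ch == "(" or ch == ")" or ch == " ":
--             if buf:
--                 tokens.append("".join(buf))
--             buf = []
--             if ch != " ":
--                 tokens.append(ch)
--         else:
--             buf.append(ch)
--     if buf:
--         tokens.append("".join(buf))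
--     return tokens
-- ===== Notes on version B (the rewrite author's own statement) =====
-- stated objective: simpler
-- what changed: Replaced split-on-space followed by a nested per-token character loop and an empty-token filtering pass with a single linear pass over the string that flushes a nonempty buffer at each space or parenthesis character, emitting parentheses as their own tokens, so empty tokens never arise.
import Mathlib
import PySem

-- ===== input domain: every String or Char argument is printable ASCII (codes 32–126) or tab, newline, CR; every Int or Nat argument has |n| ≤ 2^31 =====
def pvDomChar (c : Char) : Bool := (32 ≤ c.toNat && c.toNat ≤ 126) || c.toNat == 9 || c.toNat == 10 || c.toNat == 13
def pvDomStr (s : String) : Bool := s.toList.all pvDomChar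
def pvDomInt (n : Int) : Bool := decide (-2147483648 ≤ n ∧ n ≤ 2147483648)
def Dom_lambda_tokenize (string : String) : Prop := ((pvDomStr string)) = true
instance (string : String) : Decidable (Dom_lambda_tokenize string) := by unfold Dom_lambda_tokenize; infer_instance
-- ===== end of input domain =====

-- B is a single-pass tokenizer (flush the buffer at space/parenthesis characters) replacing A's split-then-nested-loop; same cost, simpler shape.
-- Strings are handled on the List Char side (PySem convention); tokens become String at the end.

-- ===== PORT A =====
-- inner loop of A over one space-separated token: state (tokens, current_token)
def pvInnerA (tok : List Char) : List (List Char) :=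
  let st := tok.foldl
    (fun (st : List (List Char) × List Char) c =>
      if c = ')' ∨ c = '(' then (st.1 ++ [st.2, [c]], ([] : List Char))
      else (st.1, st.2 ++ [c]))
    ([], [])
  st.1 ++ [st.2]

def lambda_tokenize (string : String) : List String :=
  let space_separated := PySem.Chars.splitOn string.toList [' ']
  let new_tokens := space_separated.foldl
    (fun acc tok => acc ++ (pvInnerA tok).filter (fun t => !t.isEmpty)) []
  new_tokens.map String.ofList

-- ===== PORT B =====
-- flush: append the buffer as a token if it is nonempty
def pvFlushB (acc : List (List Char)) (buf : List Char) : List (List Char) :=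
  if buf.isEmpty then acc else acc ++ [buf]

def lambda_tokenize_alt (string : String) : List String :=
  let st := string.toList.foldl
    (fun (st : List (List Char) × List Char) c =>
      if c = '(' ∨ c = ')' ∨ c = ' ' then
        ((if c = ' ' then pvFlushB st.1 st.2 else pvFlushB st.1 st.2 ++ [[c]]), ([] : List Char))
      else (st.1, st.2 ++ [c]))
    ([], [])
  (pvFlushB st.1 st.2).map String.ofList

-- ===== PRECONDITION & SPEC =====
def Spec_lambda_tokenize (string : String) (out : List String) : Prop := out = lambda_tokenize_alt string
instance (string : String) (out : List String) : Decidable (Spec_lambda_tokenize string out) := by unfold Spec_lambda_tokenize; infer_instance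

-- ===== CLAIM (what is proved, stated in full; the proofs are below) =====
def Claim_equal_lambda_tokenize : Prop := ∀ (string : String), Dom_lambda_tokenize string → Spec_lambda_tokenize string (lambda_tokenize string)

-- ===== LEMMAS AND PROOFS =====

-- structural model of str.split(" ")
def pvSplitSp : List Char → List (List Char)
  | [] => [[]]
  | c :: rest =>
      if c = ' ' then [] :: pvSplitSp rest
      else match pvSplitSp rest with
        | [] => [[c]]
        | t :: ts => (c :: t) :: ts

-- structural model of A's inner loop
def pvInner : List Char → List (List Char)
  | [] => [[]]
  | c :: rest =>
      if c = ')' ∨ c = '(' then [] :: [c] :: pvInner rest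
      else match pvInner rest with
        | [] => [[c]]
        | t :: ts => (c :: t) :: ts

-- prepend to the head token
def pvConsH (pre : List Char) : List (List Char) → List (List Char)
  | [] => [pre]
  | t :: ts => (pre ++ t) :: ts

def pvG (tok : List Char) : List (List Char) := (pvInner tok).filter (fun t => !t.isEmpty)

-- single-pass spec: buffer + remaining input
def pvF (buf : List Char) : List Char → List (List Char)
  | [] => if buf.isEmpty then [] else [buf]
  | c :: rest =>
      if c = ' ' then (if buf.isEmpty then [] else [buf]) ++ pvF [] rest
      else if c = '(' ∨ c = ')' then (if buf.isEmpty then [] else [buf]) ++ [c] :: pvF [] rest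
      else pvF (buf ++ [c]) rest

theorem pvSplitSp_ne_nil (l : List Char) : pvSplitSp l ≠ [] := by
  cases l with
  | nil => simp [pvSplitSp]
  | cons c rest =>
    simp only [pvSplitSp]
    split
    · simp
    · split <;> simp

theorem pvInner_ne_nil (l : List Char) : pvInner l ≠ [] := by
  cases l with
  | nil => simp [pvInner]
  | cons c rest =>
    simp only [pvInner]
    split
    · simp
    · split <;> simp

theorem pvConsH_nil_eq {xs : List (List Char)} (h : xs ≠ []) : pvConsH [] xs = xs := by
  cases xs with
  | nil => exact absurd rfl h
  | cons t ts => simp [pvConsH]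

theorem pv_go_eq (l : List Char) : ∀ (fuel : Nat) (cur : List Char) (acc : List (List Char)),
    l.length < fuel →
    PySem.Chars.splitOn.go [' '] fuel l cur acc = acc.reverse ++ pvConsH cur.reverse (pvSplitSp l) := by
  induction l with
  | nil =>
    intro fuel cur acc h
    cases fuel with
    | zero => omega
    | succ fuel =>
      rw [PySem.Chars.splitOn.go]
      simp [pvSplitSp, pvConsH]
      omega
  | cons c rest ih =>
    intro fuel cur acc h
    cases fuel with
    | zero => omega
    | succ fuel =>
      rw [PySem.Chars.splitOn.go]
      by_cases hc : c = ' '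
      · subst hc
        rw [if_pos (by simp [List.isPrefixOf])]
        have hlen : List.drop ([' '].length) (' ' :: rest) = rest := rfl
        rw [hlen, ih fuel [] (cur.reverse :: acc) (by simp at h; omega)]
        simp only [List.reverse_nil, pvConsH_nil_eq (pvSplitSp_ne_nil rest)]
        simp [pvSplitSp, pvConsH]
      · have hpre : ([' '].isPrefixOf (c :: rest)) = false := by
          simp [List.isPrefixOf]
          exact fun hh => absurd hh.symm hc
        rw [if_neg (by simp [hpre])]
        rw [ih fuel (c :: cur) acc (by simp at h; omega)]
        simp only [pvSplitSp, if_neg hc]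
        cases hsp : pvSplitSp rest with
        | nil => exact absurd hsp (pvSplitSp_ne_nil rest)
        | cons t ts => simp [pvConsH]

theorem pv_splitOn_space (l : List Char) : PySem.Chars.splitOn l [' '] = pvSplitSp l := by
  have := pv_go_eq l (l.length + 1) [] [] (by omega)
  rw [PySem.Chars.splitOn, this]
  cases hsp : pvSplitSp l with
  | nil => exact absurd hsp (pvSplitSp_ne_nil l)
  | cons t ts => simp [pvConsH]

theorem pvInnerA_foldl (tok : List Char) : ∀ (tokens : List (List Char)) (cur : List Char),
    (tok.foldl (fun (st : List (List Char) × List Char) c =>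
      if c = ')' ∨ c = '(' then (st.1 ++ [st.2, [c]], ([] : List Char))
      else (st.1, st.2 ++ [c])) (tokens, cur)).1
    ++ [(tok.foldl (fun (st : List (List Char) × List Char) c =>
      if c = ')' ∨ c = '(' then (st.1 ++ [st.2, [c]], ([] : List Char))
      else (st.1, st.2 ++ [c])) (tokens, cur)).2]
    = tokens ++ pvConsH cur (pvInner tok) := by
  induction tok with
  | nil => intro tokens cur; simp [pvInner, pvConsH]
  | cons c rest ih =>
    intro tokens cur
    simp only [List.foldl_cons, pvInner]
    by_cases hc : c = ')' ∨ c = '('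
    · rw [if_pos hc, if_pos hc, ih]
      cases hsp : pvInner rest with
      | nil => exact absurd hsp (pvInner_ne_nil rest)
      | cons t ts => simp [pvConsH]
    · rw [if_neg hc, if_neg hc, ih]
      cases hsp : pvInner rest with
      | nil => exact absurd hsp (pvInner_ne_nil rest)
      | cons t ts => simp [pvConsH]

theorem pvInnerA_eq (tok : List Char) : pvInnerA tok = pvInner tok := by
  have := pvInnerA_foldl tok [] []
  simp only [pvInnerA]
  rw [this]
  cases hsp : pvInner tok with
  | nil => exact absurd hsp (pvInner_ne_nil tok)
  | cons t ts => simp [pvConsH]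

theorem pvF_eq_split (l : List Char) : ∀ (buf : List Char),
    pvF buf l = (pvConsH buf (pvInner (pvSplitSp l).headI)).filter (fun t => !t.isEmpty)
      ++ ((pvSplitSp l).tail).flatMap pvG := by
  induction l with
  | nil =>
    intro buf
    cases buf <;> simp [pvF, pvSplitSp, pvInner, pvConsH]
  | cons c rest ih =>
    intro buf
    rcases hsp : pvSplitSp rest with _ | ⟨t', ts'⟩
    · exact absurd hsp (pvSplitSp_ne_nil rest)
    have hR : ¬ c = ' ' → pvSplitSp (c :: rest) = (c :: t') :: ts' := by
      intro h; simp [pvSplitSp, hsp, h]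
    by_cases hc : c = ' '
    · subst hc
      have hL : pvF buf (' ' :: rest) = (if buf.isEmpty then [] else [buf]) ++ pvF [] rest := by
        simp [pvF]
      have hR' : pvSplitSp (' ' :: rest) = [] :: t' :: ts' := by simp [pvSplitSp, hsp]
      rw [hL, ih [], hsp, hR']
      simp only [List.headI_cons, List.tail_cons]
      rw [pvConsH_nil_eq (pvInner_ne_nil t')]
      cases hb : buf.isEmpty <;>
        simp [pvInner, pvConsH, pvG, hb, List.flatMap_cons]
    · by_cases hp : c = '(' ∨ c = ')'
      · have hL : pvF buf (c :: rest) = (if buf.isEmpty then [] else [buf]) ++ [c] :: pvF [] rest := by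
          rcases hp with rfl | rfl <;> simp [pvF]
        have hI : pvInner (c :: t') = [] :: [c] :: pvInner t' := by
          have hp2 : c = ')' ∨ c = '(' := hp.symm
          simp [pvInner, hp2]
        rw [hL, ih [], hsp, hR hc]
        simp only [List.headI_cons, List.tail_cons]
        rw [pvConsH_nil_eq (pvInner_ne_nil t'), hI]
        cases hb : buf.isEmpty <;>
          simp [pvConsH, hb]
      · have hp' : ¬ (c = ')' ∨ c = '(') := fun h' => hp h'.symm
        have hL : pvF buf (c :: rest) = pvF (buf ++ [c]) rest := by
          simp [pvF, hc, hp]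
        have hI : pvInner (c :: t') = pvConsH [c] (pvInner t') := by
          rcases hin : pvInner t' with _ | ⟨u, us⟩
          · exact absurd hin (pvInner_ne_nil t')
          · simp [pvInner, hp', hin, pvConsH]
        rw [hL, ih (buf ++ [c]), hsp, hR hc]
        simp only [List.headI_cons, List.tail_cons]
        rw [hI]
        rcases hin : pvInner t' with _ | ⟨u, us⟩
        · exact absurd hin (pvInner_ne_nil t')
        · simp [pvConsH]

theorem pvB_foldl (l : List Char) : ∀ (acc : List (List Char)) (buf : List Char),
    pvFlushB (l.foldl (fun (st : List (List Char) × List Char) c =>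
      if c = '(' ∨ c = ')' ∨ c = ' ' then
        ((if c = ' ' then pvFlushB st.1 st.2 else pvFlushB st.1 st.2 ++ [[c]]), ([] : List Char))
      else (st.1, st.2 ++ [c])) (acc, buf)).1
      ((l.foldl (fun (st : List (List Char) × List Char) c =>
      if c = '(' ∨ c = ')' ∨ c = ' ' then
        ((if c = ' ' then pvFlushB st.1 st.2 else pvFlushB st.1 st.2 ++ [[c]]), ([] : List Char))
      else (st.1, st.2 ++ [c])) (acc, buf)).2)
    = acc ++ pvF buf l := by
  induction l with
  | nil => intro acc buf; cases buf <;> simp [pvF, pvFlushB]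
  | cons c rest ih =>
    intro acc buf
    simp only [List.foldl_cons]
    by_cases hsp : c = '(' ∨ c = ')' ∨ c = ' '
    · rw [if_pos hsp]
      by_cases hc : c = ' '
      · rw [if_pos hc, ih]
        subst hc
        cases buf <;> simp [pvF, pvFlushB]
      · rw [if_neg hc, ih]
        have hp : c = '(' ∨ c = ')' := by tauto
        rcases hp with rfl | rfl <;> cases buf <;> simp [pvF, pvFlushB]
    · rw [if_neg hsp, ih]
      have hc : c ≠ ' ' := fun h => hsp (Or.inr (Or.inr h))
      have hp : ¬ (c = '(' ∨ c = ')') := fun h => hsp (by tauto)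
      simp [pvF, if_neg hc, if_neg hp]

-- ===== VERDICT (by name: the statement is the Claim_ definition above) =====
theorem lambda_tokenize_spec : Claim_equal_lambda_tokenize := by
  intro string _
  unfold Spec_lambda_tokenize lambda_tokenize lambda_tokenize_alt
  dsimp only
  rw [pv_splitOn_space]
  rw [PySem.List.foldl_append_eq_flatMap (fun tok => (pvInnerA tok).filter (fun t => !t.isEmpty))]
  rw [pvB_foldl string.toList [] []]
  simp only [List.nil_append]
  congr 1
  rw [pvF_eq_split string.toList []]
  rcases hsp : pvSplitSp string.toList with _ | ⟨t, ts⟩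
  · exact absurd hsp (pvSplitSp_ne_nil string.toList)
  · simp only [List.headI_cons, List.tail_cons]
    rw [pvConsH_nil_eq (pvInner_ne_nil t)]
    simp only [List.flatMap_cons, pvInnerA_eq]
    rfl
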